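-- pv_equiv track=rewrite | github.com/GuilhermeMouraMororo/whatsapp-mvp | app.py | extract_numbers_and_positions
-- ===== SOURCE A (Python) =====
-- units = {
--     "0":0, "1":1, "2":2, "3":3, "4":4, "5":5, "6":6, "7":7, "8":8, "9":9,
--     "zero":0, "um":1, "uma":1, "dois":2, "duas":2, "dos":2, "tres":3, "tres":3, "treis": 3,
--     "quatro":4, "quarto":4, "cinco":5, "cnico": 5, "seis":6, "ses":6, "sete":7, "oito":8, "nove":9, "nov": 9
-- }
--
-- teens = {
--     "dez":10, "onze":11, "doze":12, "treze":13, "quatorze":14, "catorze":14,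
--     "quinze":15, "dezesseis":16, "dezessete":17, "dezoito":18, "dezenove":19
-- }
--
-- tens = {
--     "vinte":20, "trinta":30, "quarenta":40, "cinquenta":50, "sessenta":60,
--     "setenta":70, "oitenta":80, "noventa":90
-- }
--
-- hundreds = {
--     "cem":100, "cento":100, "duzentos":200, "trezentos":300, "quatrocentos":400,
--     "quinhentos":500, "seiscentos":600, "setecentos":700, "oitocentos":800,
--     "novecentos":900
-- }
--
-- word2num_all = {**units, **teens, **tens, **hundreds}
--
-- def parse_number_words(tokens):
--     """Parse list of number-word tokens (no 'e' tokens) into integer (supports up to 999)."""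
--     total = 0
--     i = 0
--     while i < len(tokens):
--         t = tokens[i]
--         if t in hundreds:
--             total += hundreds[t]
--             i += 1
--         elif t in tens:
--             val = tens[t]
--             if i + 1 < len(tokens) and tokens[i+1] in units:
--                 val += units[tokens[i+1]]
--                 i += 2
--             else:
--                 i += 1
--             total += val
--         elif t in teens:
--             total += teens[t]; i += 1
--         elif t in units:
--             total += units[t]; i += 1
--         else:
--             i += 1
--     return total if total > 0 else None
--
-- def extract_numbers_and_positions(tokens):
--     """Extract all numbers and their positions from tokens"""
--     numbers = []
--
--     i = 0
--     while i < len(tokens):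
--         if tokens[i].isdigit():
--             numbers.append((i, int(tokens[i])))
--             i += 1
--         elif tokens[i] in word2num_all:
--             # Only combine number words if they're connected by "e"
--             num_tokens = [tokens[i]]
--             j = i + 1
--
--             # Look for "e" followed by a number word
--             while j < len(tokens) - 1:
--                 if tokens[j] == "e" and tokens[j+1] in word2num_all:
--                     num_tokens.extend([tokens[j], tokens[j+1]])
--                     j += 2
--                 else:
--                     break
--
--             # Parse the number tokens
--             number = parse_number_words([t for t in num_tokens if t != "e"])
--             if number:
--                 numbers.append((i, number))
--                 i = j
--             else:
--                 i += 1
--         else: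
--             i += 1
--
--     return numbers
-- ===== SOURCE B (Python) =====
-- units = {
--     "0":0, "1":1, "2":2, "3":3, "4":4, "5":5, "6":6, "7":7, "8":8, "9":9,
--     "zero":0, "um":1, "uma":1, "dois":2, "duas":2, "dos":2, "tres":3, "treis": 3,
--     "quatro":4, "quarto":4, "cinco":5, "cnico": 5, "seis":6, "ses":6, "sete":7, "oito":8, "nove":9, "nov": 9
-- }
--
-- teens = {
--     "dez":10, "onze":11, "doze":12, "treze":13, "quatorze":14, "catorze":14,
--     "quinze":15, "dezesseis":16, "dezessete":17, "dezoito":18, "dezenove":19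
-- }
--
-- tens = {
--     "vinte":20, "trinta":30, "quarenta":40, "cinquenta":50, "sessenta":60,
--     "setenta":70, "oitenta":80, "noventa":90
-- }
--
-- hundreds = {
--     "cem":100, "cento":100, "duzentos":200, "trezentos":300, "quatrocentos":400,
--     "quinhentos":500, "seiscentos":600, "setecentos":700, "oitocentos":800,
--     "novecentos":900
-- }
--
-- word2num_all = {**units, **teens, **tens, **hundreds}
--
-- def extract_numbers_and_positions(tokens):
--     """Single fused pass: no helper, no intermediate token list.
--     The combined value of an 'e'-joined chain is simply the sum of the chain
--     words' values (the tens+unit pairing adds the same two values), so we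
--     accumulate a running total while following the chain."""
--     n = len(tokens)
--     numbers = []
--     i = 0
--     while i < n:
--         t = tokens[i]
--         if t.isdigit():
--             numbers.append((i, int(t)))
--             i += 1
--         elif t in word2num_all:
--             total = word2num_all[t]
--             j = i + 1
--             while j + 1 < n and tokens[j] == "e" and tokens[j + 1] in word2num_all:
--                 total += word2num_all[tokens[j + 1]]
--                 j += 2
--             if total > 0:
--                 numbers.append((i, total))
--                 i = j
--             else:
--                 i += 1
--         else:
--             i += 1
--     return numbers
-- ===== Notes on version B (the rewrite author's own statement) =====
-- stated objective: simpler
-- what changed: Single fused pass: the parse_number_words helper and the intermediate num_tokens list are gone; a running total is accumulated directly while following the 'e'-joined chain (the tens+unit pairing contributes the same sum), emitting (i, total) when total > 0.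
import Mathlib
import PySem

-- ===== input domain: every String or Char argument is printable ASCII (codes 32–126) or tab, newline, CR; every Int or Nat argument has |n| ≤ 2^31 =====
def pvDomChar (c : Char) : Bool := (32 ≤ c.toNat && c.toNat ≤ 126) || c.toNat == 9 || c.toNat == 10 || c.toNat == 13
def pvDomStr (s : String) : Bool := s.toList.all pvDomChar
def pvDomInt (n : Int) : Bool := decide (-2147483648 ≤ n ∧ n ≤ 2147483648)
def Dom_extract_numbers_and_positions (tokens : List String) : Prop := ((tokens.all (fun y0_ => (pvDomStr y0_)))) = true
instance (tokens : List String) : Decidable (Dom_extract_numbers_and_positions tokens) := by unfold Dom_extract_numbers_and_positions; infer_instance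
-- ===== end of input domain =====

-- B is a single fused pass: the parse_number_words helper and the intermediate
-- num_tokens list of A are gone, a running total is accumulated while walking
-- the 'e'-joined chain. Return-value equivalence; neither version mutates.
-- While loops are ported as structural recursion on a fuel argument; fuel =
-- tokens.length is enough since every iteration advances the index by ≥ 1.

-- ===== PORT A =====
def pv_units : PySem.Dict String Int := PySem.Dict.ofList [
  ("0",0), ("1",1), ("2",2), ("3",3), ("4",4), ("5",5), ("6",6), ("7",7), ("8",8), ("9",9),
  ("zero",0), ("um",1), ("uma",1), ("dois",2), ("duas",2), ("dos",2), ("tres",3), ("tres",3), ("treis",3),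
  ("quatro",4), ("quarto",4), ("cinco",5), ("cnico",5), ("seis",6), ("ses",6), ("sete",7), ("oito",8), ("nove",9), ("nov",9)]

def pv_teens : PySem.Dict String Int := PySem.Dict.ofList [
  ("dez",10), ("onze",11), ("doze",12), ("treze",13), ("quatorze",14), ("catorze",14),
  ("quinze",15), ("dezesseis",16), ("dezessete",17), ("dezoito",18), ("dezenove",19)]

def pv_tens : PySem.Dict String Int := PySem.Dict.ofList [
  ("vinte",20), ("trinta",30), ("quarenta",40), ("cinquenta",50), ("sessenta",60),
  ("setenta",70), ("oitenta",80), ("noventa",90)]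

def pv_hundreds : PySem.Dict String Int := PySem.Dict.ofList [
  ("cem",100), ("cento",100), ("duzentos",200), ("trezentos",300), ("quatrocentos",400),
  ("quinhentos",500), ("seiscentos",600), ("setecentos",700), ("oitocentos",800),
  ("novecentos",900)]

-- {**units, **teens, **tens, **hundreds}
def pv_word2num_all : PySem.Dict String Int :=
  ((pv_units.update pv_teens.items).update pv_tens.items).update pv_hundreds.items

-- while-loop of parse_number_words (index i over tokens); dict lookups d[t]
-- are getD _ 0, exact because each is guarded by the membership test.
def parse_number_words_loop (tokens : List String) : Nat → Int → Nat → Int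
  | 0, total, _ => total
  | fuel + 1, total, i =>
    if i < tokens.length then
      if pv_hundreds.contains (tokens.getD i "") then
        parse_number_words_loop tokens fuel (total + pv_hundreds.getD (tokens.getD i "") 0) (i + 1)
      else if pv_tens.contains (tokens.getD i "") then
        if i + 1 < tokens.length ∧ pv_units.contains (tokens.getD (i + 1) "") then
          parse_number_words_loop tokens fuel
            (total + (pv_tens.getD (tokens.getD i "") 0 + pv_units.getD (tokens.getD (i + 1) "") 0)) (i + 2)
        else
          parse_number_words_loop tokens fuel (total + pv_tens.getD (tokens.getD i "") 0) (i + 1)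
      else if pv_teens.contains (tokens.getD i "") then
        parse_number_words_loop tokens fuel (total + pv_teens.getD (tokens.getD i "") 0) (i + 1)
      else if pv_units.contains (tokens.getD i "") then
        parse_number_words_loop tokens fuel (total + pv_units.getD (tokens.getD i "") 0) (i + 1)
      else
        parse_number_words_loop tokens fuel total (i + 1)
    else total

def parse_number_words (tokens : List String) : Option Int :=
  let total := parse_number_words_loop tokens tokens.length 0 0
  if total > 0 then some total else none

-- inner while collecting num_tokens (the "e" chain)
def pv_jloop (tokens : List String) : Nat → List String → Nat → List String × Nat
  | 0, num_tokens, j => (num_tokens, j)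
  | fuel + 1, num_tokens, j =>
    if j < tokens.length - 1 ∧ tokens.getD j "" = "e" ∧
        pv_word2num_all.contains (tokens.getD (j + 1) "") then
      pv_jloop tokens fuel (num_tokens ++ [tokens.getD j "", tokens.getD (j + 1) ""]) (j + 2)
    else (num_tokens, j)

def pv_extract_loop (tokens : List String) : Nat → List (Int × Int) → Nat → List (Int × Int)
  | 0, numbers, _ => numbers
  | fuel + 1, numbers, i =>
    if i < tokens.length then
      if PySem.Str.strIsdigit (tokens.getD i "") then
        -- int(tokens[i]): isdigit guarantees ofStr? = some, so getD 0 is exact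
        pv_extract_loop tokens fuel
          (numbers ++ [((i : Int), (PySem.Int.ofStr? (tokens.getD i "")).getD 0)]) (i + 1)
      else if pv_word2num_all.contains (tokens.getD i "") then
        -- if number: (Python truthiness of Optional[int])
        match parse_number_words (((pv_jloop tokens tokens.length [tokens.getD i ""] (i + 1)).1).filter
            (fun x => x ≠ "e")) with
        | some v =>
          if v ≠ 0 then
            pv_extract_loop tokens fuel (numbers ++ [((i : Int), v)])
              (pv_jloop tokens tokens.length [tokens.getD i ""] (i + 1)).2
          else pv_extract_loop tokens fuel numbers (i + 1)
        | none => pv_extract_loop tokens fuel numbers (i + 1)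
      else
        pv_extract_loop tokens fuel numbers (i + 1)
    else numbers

def extract_numbers_and_positions (tokens : List String) : List (Int × Int) :=
  pv_extract_loop tokens tokens.length [] 0

-- ===== PORT B =====
-- inner while of B: accumulate the running total along the chain
def pvB_chain (tokens : List String) : Nat → Int → Nat → Int × Nat
  | 0, total, j => (total, j)
  | fuel + 1, total, j =>
    if j + 1 < tokens.length ∧ tokens.getD j "" = "e" ∧
        pv_word2num_all.contains (tokens.getD (j + 1) "") then
      pvB_chain tokens fuel (total + pv_word2num_all.getD (tokens.getD (j + 1) "") 0) (j + 2)
    else (total, j)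

def pvB_loop (tokens : List String) : Nat → List (Int × Int) → Nat → List (Int × Int)
  | 0, numbers, _ => numbers
  | fuel + 1, numbers, i =>
    if i < tokens.length then
      if PySem.Str.strIsdigit (tokens.getD i "") then
        pvB_loop tokens fuel
          (numbers ++ [((i : Int), (PySem.Int.ofStr? (tokens.getD i "")).getD 0)]) (i + 1)
      else if pv_word2num_all.contains (tokens.getD i "") then
        if (pvB_chain tokens tokens.length (pv_word2num_all.getD (tokens.getD i "") 0) (i + 1)).1 > 0 then
          pvB_loop tokens fuel
            (numbers ++ [((i : Int),
              (pvB_chain tokens tokens.length (pv_word2num_all.getD (tokens.getD i "") 0) (i + 1)).1)])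
            (pvB_chain tokens tokens.length (pv_word2num_all.getD (tokens.getD i "") 0) (i + 1)).2
        else pvB_loop tokens fuel numbers (i + 1)
      else
        pvB_loop tokens fuel numbers (i + 1)
    else numbers

def extract_numbers_and_positions_alt (tokens : List String) : List (Int × Int) :=
  pvB_loop tokens tokens.length [] 0

-- ===== PRECONDITION & SPEC =====
def Spec_extract_numbers_and_positions (tokens : List String) (out : List (Int × Int)) : Prop := out = extract_numbers_and_positions_alt tokens
instance (tokens : List String) (out : List (Int × Int)) : Decidable (Spec_extract_numbers_and_positions tokens out) := by unfold Spec_extract_numbers_and_positions; infer_instance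

-- ===== CLAIM (what is proved, stated in full; the proofs are below) =====
def Claim_equal_extract_numbers_and_positions : Prop := ∀ (tokens : List String), Dom_extract_numbers_and_positions tokens → Spec_extract_numbers_and_positions tokens (extract_numbers_and_positions tokens)

-- ===== LEMMAS AND PROOFS =====

-- value parse_number_words assigns to a single word (category cascade)
def pvValOf (w : String) : Int :=
  if pv_hundreds.contains w then pv_hundreds.getD w 0
  else if pv_tens.contains w then pv_tens.getD w 0
  else if pv_teens.contains w then pv_teens.getD w 0
  else if pv_units.contains w then pv_units.getD w 0
  else 0

set_option maxRecDepth 100000 in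
theorem pv_units_keys_disjoint : pv_units.keys.all
    (fun w => !pv_hundreds.contains w && !pv_tens.contains w && !pv_teens.contains w) = true := by decide

set_option maxRecDepth 100000 in
theorem pv_w2n_keys_val : pv_word2num_all.keys.all
    (fun w => pvValOf w == pv_word2num_all.getD w 0) = true := by decide

theorem pv_units_disjoint (w : String) (h : pv_units.contains w = true) :
    pv_hundreds.contains w = false ∧ pv_tens.contains w = false ∧ pv_teens.contains w = false := by
  have hk := (PySem.Dict.contains_iff_mem_keys _ _).mp h
  have h2 := List.all_eq_true.mp pv_units_keys_disjoint w hk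
  simp only [Bool.and_eq_true, Bool.not_eq_true'] at h2
  exact ⟨h2.1.1, h2.1.2, h2.2⟩

theorem pvValOf_w2n (w : String) (h : pv_word2num_all.contains w = true) :
    pvValOf w = pv_word2num_all.getD w 0 := by
  have hk := (PySem.Dict.contains_iff_mem_keys _ _).mp h
  exact beq_iff_eq.mp (List.all_eq_true.mp pv_w2n_keys_val w hk)

theorem pv_e_not_w2n : pv_word2num_all.contains "e" = false := by
  set_option maxRecDepth 10000 in decide

theorem pv_ne_e (w : String) (h : pv_word2num_all.contains w = true) : w ≠ "e" := by
  intro he; rw [he, pv_e_not_w2n] at h; exact Bool.false_ne_true h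

-- parse_number_words_loop just sums pvValOf over the remaining tokens
theorem parse_loop_sum (tokens : List String) (fuel : Nat) (total : Int) (i : Nat)
    (hf : tokens.length ≤ fuel + i) :
    parse_number_words_loop tokens fuel total i = total + (((tokens.drop i).map pvValOf).sum) := by
  induction fuel generalizing total i with
  | zero =>
    rw [parse_number_words_loop, List.drop_eq_nil_of_le (by omega)]; simp
  | succ fuel ih =>
    rw [parse_number_words_loop]
    by_cases h : i < tokens.length
    · rw [if_pos h]
      have hd : tokens.drop i = tokens.getD i "" :: tokens.drop (i + 1) := by
        rw [List.getD_eq_getElem _ _ h]; exact List.drop_eq_getElem_cons h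
      by_cases h1 : pv_hundreds.contains (tokens.getD i "") = true
      · rw [if_pos h1, ih _ (i + 1) (by omega), hd]
        have hv : pvValOf (tokens.getD i "") = pv_hundreds.getD (tokens.getD i "") 0 := by
          unfold pvValOf; rw [if_pos h1]
        simp only [List.map_cons, List.sum_cons, hv]; ring
      · rw [if_neg h1]
        by_cases h2 : pv_tens.contains (tokens.getD i "") = true
        · rw [if_pos h2]
          have hv : pvValOf (tokens.getD i "") = pv_tens.getD (tokens.getD i "") 0 := by
            unfold pvValOf; rw [if_neg h1, if_pos h2]
          by_cases h3 : i + 1 < tokens.length ∧ pv_units.contains (tokens.getD (i + 1) "") = true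
          · have hd2 : tokens.drop (i + 1) = tokens.getD (i + 1) "" :: tokens.drop (i + 2) := by
              rw [List.getD_eq_getElem _ _ h3.1]; exact List.drop_eq_getElem_cons h3.1
            have hu := pv_units_disjoint _ h3.2
            have hvu : pvValOf (tokens.getD (i + 1) "") = pv_units.getD (tokens.getD (i + 1) "") 0 := by
              unfold pvValOf
              rw [hu.1, hu.2.1, hu.2.2]
              simp only [Bool.false_eq_true, if_false]
              rw [if_pos h3.2]
            rw [if_pos h3, ih _ (i + 2) (by omega), hd, hd2]
            simp only [List.map_cons, List.sum_cons, hv, hvu]; ring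
          · rw [if_neg h3, ih _ (i + 1) (by omega), hd]
            simp only [List.map_cons, List.sum_cons, hv]; ring
        · rw [if_neg h2]
          by_cases h4 : pv_teens.contains (tokens.getD i "") = true
          · rw [if_pos h4, ih _ (i + 1) (by omega), hd]
            have hv : pvValOf (tokens.getD i "") = pv_teens.getD (tokens.getD i "") 0 := by
              unfold pvValOf; rw [if_neg h1, if_neg h2, if_pos h4]
            simp only [List.map_cons, List.sum_cons, hv]; ring
          · rw [if_neg h4]
            by_cases h5 : pv_units.contains (tokens.getD i "") = true
            · rw [if_pos h5, ih _ (i + 1) (by omega), hd]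
              have hv : pvValOf (tokens.getD i "") = pv_units.getD (tokens.getD i "") 0 := by
                unfold pvValOf; rw [if_neg h1, if_neg h2, if_neg h4, if_pos h5]
              simp only [List.map_cons, List.sum_cons, hv]; ring
            · rw [if_neg h5, ih _ (i + 1) (by omega), hd]
              have hv : pvValOf (tokens.getD i "") = 0 := by
                unfold pvValOf; rw [if_neg h1, if_neg h2, if_neg h4, if_neg h5]
              simp only [List.map_cons, List.sum_cons, hv]; ring
    · rw [if_neg h, List.drop_eq_nil_of_le (by omega)]; simp

-- accumulator of pv_jloop is a prefix
theorem pv_jloop_acc (tokens : List String) (fuel : Nat) (acc : List String) (j : Nat) :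
    pv_jloop tokens fuel acc j =
      (acc ++ (pv_jloop tokens fuel [] j).1, (pv_jloop tokens fuel [] j).2) := by
  induction fuel generalizing acc j with
  | zero => simp [pv_jloop]
  | succ fuel ih =>
    rw [pv_jloop]
    conv_rhs => rw [pv_jloop]
    by_cases hc : j < tokens.length - 1 ∧ tokens.getD j "" = "e" ∧
        pv_word2num_all.contains (tokens.getD (j + 1) "") = true
    · rw [if_pos hc, if_pos hc]
      simp only [List.nil_append]
      rw [ih (acc ++ _) (j + 2), ih [_, _] (j + 2)]
      simp [List.append_assoc]
    · rw [if_neg hc, if_neg hc]; simp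

theorem pv_jloop_le (tokens : List String) (fuel : Nat) (acc : List String) (j : Nat) :
    j ≤ (pv_jloop tokens fuel acc j).2 := by
  induction fuel generalizing acc j with
  | zero => simp [pv_jloop]
  | succ fuel ih =>
    rw [pv_jloop]
    split
    · exact le_trans (by omega) (ih _ (j + 2))
    · simp

theorem pv_filter_e_cons (w : String) (hw : w ≠ "e") (C : List String) :
    List.filter (fun x => x ≠ "e") ("e" :: w :: C) =
      w :: List.filter (fun x => x ≠ "e") C := by simp [hw]

theorem pv_filter_ne_cons (w : String) (hw : w ≠ "e") (C : List String) :
    List.filter (fun x => x ≠ "e") (w :: C) = w :: List.filter (fun x => x ≠ "e") C := by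
  simp [hw]

-- B's chain loop computes the sum of pvValOf over A's collected chain (minus "e"s)
theorem pvB_chain_eq (tokens : List String) (fuel : Nat) (total : Int) (j : Nat) :
    pvB_chain tokens fuel total j =
      (total + ((((pv_jloop tokens fuel [] j).1.filter (fun x => x ≠ "e")).map pvValOf).sum),
       (pv_jloop tokens fuel [] j).2) := by
  induction fuel generalizing total j with
  | zero => simp [pvB_chain, pv_jloop]
  | succ fuel ih =>
    rw [pvB_chain]
    conv_rhs => rw [pv_jloop]
    by_cases hc : j + 1 < tokens.length ∧ tokens.getD j "" = "e" ∧
        pv_word2num_all.contains (tokens.getD (j + 1) "") = true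
    · have hcA : j < tokens.length - 1 ∧ tokens.getD j "" = "e" ∧
          pv_word2num_all.contains (tokens.getD (j + 1) "") = true :=
        ⟨by omega, hc.2.1, hc.2.2⟩
      rw [if_pos hc, if_pos hcA, ih _ (j + 2),
        pv_jloop_acc tokens fuel ([] ++ [tokens.getD j "", tokens.getD (j + 1) ""]) (j + 2)]
      have hne : tokens.getD (j + 1) "" ≠ "e" := pv_ne_e _ hc.2.2
      rw [hc.2.1]
      simp only [List.nil_append, List.cons_append]
      rw [pv_filter_e_cons _ hne]
      simp only [List.map_cons, List.sum_cons, pvValOf_w2n _ hc.2.2]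
      exact Prod.ext (by ring) rfl
    · have hcA : ¬ (j < tokens.length - 1 ∧ tokens.getD j "" = "e" ∧
          pv_word2num_all.contains (tokens.getD (j + 1) "") = true) := by
        intro h; exact hc ⟨by omega, h.2.1, h.2.2⟩
      rw [if_neg hc, if_neg hcA]
      simp

theorem pv_loops_eq (tokens : List String) (fuel : Nat) (numbers : List (Int × Int)) (i : Nat)
    (hf : tokens.length ≤ fuel + i) :
    pv_extract_loop tokens fuel numbers i = pvB_loop tokens fuel numbers i := by
  induction fuel generalizing numbers i with
  | zero => rw [pv_extract_loop, pvB_loop]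
  | succ fuel ih =>
    rw [pv_extract_loop, pvB_loop]
    by_cases hi : i < tokens.length
    · rw [if_pos hi, if_pos hi]
      by_cases hdig : PySem.Str.strIsdigit (tokens.getD i "") = true
      · rw [if_pos hdig, if_pos hdig, ih _ (i + 1) (by omega)]
      · rw [if_neg hdig, if_neg hdig]
        by_cases hw : pv_word2num_all.contains (tokens.getD i "") = true
        · rw [if_pos hw, if_pos hw]
          have hne : tokens.getD i "" ≠ "e" := pv_ne_e _ hw
          have hjle := pv_jloop_le tokens tokens.length [tokens.getD i ""] (i + 1)
          rw [pv_jloop_acc tokens tokens.length [tokens.getD i ""] (i + 1),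
            pvB_chain_eq tokens tokens.length (pv_word2num_all.getD (tokens.getD i "") 0) (i + 1)]
          rw [pv_jloop_acc tokens tokens.length [tokens.getD i ""] (i + 1)] at hjle
          simp only [List.cons_append, List.nil_append] at hjle ⊢
          rw [pv_filter_ne_cons _ hne]
          unfold parse_number_words
          rw [parse_loop_sum _ _ _ _ (by omega)]
          simp only [List.drop_zero, List.map_cons, List.sum_cons, zero_add,
            pvValOf_w2n _ hw]
          by_cases hpos : pv_word2num_all.getD (tokens.getD i "") 0 +
              ((((pv_jloop tokens tokens.length [] (i + 1)).1.filter
                (fun x => x ≠ "e")).map pvValOf).sum) > 0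
          · rw [if_pos hpos, if_pos hpos]
            simp only []
            rw [if_pos (by omega : pv_word2num_all.getD (tokens.getD i "") 0 +
              ((((pv_jloop tokens tokens.length [] (i + 1)).1.filter
                (fun x => x ≠ "e")).map pvValOf).sum) ≠ 0)]
            exact ih _ ((pv_jloop tokens tokens.length [] (i + 1)).2) (by omega)
          · rw [if_neg hpos, if_neg hpos]
            exact ih numbers (i + 1) (by omega)
        · rw [if_neg hw, if_neg hw, ih numbers (i + 1) (by omega)]
    · rw [if_neg hi, if_neg hi]

-- ===== VERDICT (by name: the statement is the Claim_ definition above) =====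
theorem extract_numbers_and_positions_spec : Claim_equal_extract_numbers_and_positions := by
  intro tokens _
  unfold Spec_extract_numbers_and_positions extract_numbers_and_positions extract_numbers_and_positions_alt
  exact pv_loops_eq tokens tokens.length [] 0 (by omega)
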